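-- pv_equiv track=rewrite | github.com/stellarbg/Algorithm | 백준/Silver/3085. 사탕 게임/사탕 게임.py | count
-- ===== SOURCE A (Python) =====
-- def count(list):
--     cnt = ans = 1
--
--     for i in range(1, len(list)):
--         if list[i] == list[i - 1]:
--             cnt += 1
--             ans = max(cnt, ans)
--         else:
--             cnt = 1
--     return ans
-- ===== SOURCE B (Python) =====
-- def count(list):
--     # run-by-run scan: the inner loop finds the end of each maximal run of
--     # equal elements, the outer loop jumps run to run keeping the longest
--     # run length (empty input -> 1, nothing beats the initial best)
--     best = 1
--     n = len(list)
--     i = 0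
--     while i < n:
--         j = i + 1
--         while j < n and list[j] == list[i]:
--             j += 1
--         if j - i > best:
--             best = j - i
--         i = j
--     return best
-- ===== Notes on version B (the rewrite author's own statement) =====
-- stated objective: alternative
-- what changed: B scans the input run by run (an inner loop measures each maximal run of equal elements and jumps past it) and keeps the longest run length, instead of A's single index loop threading a running counter that resets on inequality.
import Mathlib
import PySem

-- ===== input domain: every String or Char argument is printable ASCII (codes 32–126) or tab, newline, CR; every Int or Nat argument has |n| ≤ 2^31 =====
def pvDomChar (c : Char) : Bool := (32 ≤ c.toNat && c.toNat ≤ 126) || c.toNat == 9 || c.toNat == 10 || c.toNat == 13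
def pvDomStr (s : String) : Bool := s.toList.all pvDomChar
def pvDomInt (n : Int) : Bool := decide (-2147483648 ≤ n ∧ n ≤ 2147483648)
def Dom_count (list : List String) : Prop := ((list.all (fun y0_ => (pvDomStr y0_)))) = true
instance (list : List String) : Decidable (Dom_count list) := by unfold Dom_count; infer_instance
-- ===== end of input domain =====

-- B scans the input run by run (inner loop measures each maximal run, jumps past it)
-- instead of A's single index loop with a resetting counter; same O(n) cost.


-- ===== PORT A =====
def count (list : List String) : Int :=
  let r := (PySem.List.pyRange 1 (PySem.List.len list) 1).foldl
    (fun (s : Int × Int) (i : Int) =>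
      if PySem.List.pyGetD list i "" == PySem.List.pyGetD list (i - 1) "" then
        (s.1 + 1, max (s.1 + 1) s.2)
      else
        (1, s.2))
    (1, 1)
  r.2

-- ===== PORT B =====
-- inner while loop of Source B: advance j while list[j] == list[i] (x = list[i])
def jEnd (l : List String) (x : String) (j : Nat) : Nat :=
  if j < l.length ∧ (l.getD j "" == x) = true then jEnd l x (j + 1) else j
  termination_by l.length - j
  decreasing_by omega

-- needed only for goB2's termination
lemma jEnd_ge (l : List String) (x : String) (j : Nat) : j ≤ jEnd l x j := by
  unfold jEnd
  split_ifs with h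
  · have := jEnd_ge l x (j + 1)
    omega
  · exact le_refl j
  termination_by l.length - j
  decreasing_by omega

-- outer while loop of Source B: jump run by run, keeping the best run length
def goB2 (l : List String) (best : Int) (i : Nat) : Int :=
  if i < l.length then
    let j := jEnd l (l.getD i "") (i + 1)
    goB2 l (if (j : Int) - i > best then (j : Int) - i else best) j
  else best
  termination_by l.length - i
  decreasing_by have := jEnd_ge l (l.getD i "") (i + 1); omega

def count_alt (list : List String) : Int := goB2 list 1 0

-- ===== PRECONDITION & SPEC =====
def Spec_count (list : List String) (out : Int) : Prop := out = count_alt list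
instance (list : List String) (out : Int) : Decidable (Spec_count list out) := by unfold Spec_count; infer_instance

-- ===== CLAIM (what is proved, stated in full; the proofs are below) =====
def Claim_equal_count : Prop := ∀ (list : List String), Dom_count list → Spec_count list (count list)

-- ===== LEMMAS AND PROOFS =====

-- number of leading elements equal to x (structural form of Source B's inner loop)
def takeRun (x : String) : List String → Nat
  | [] => 0
  | y :: t => if y == x then takeRun x t + 1 else 0

-- structural form of Source B's outer loop: rest = list[i:]
def goB : List String → Int → Int
  | [], best => best
  | x :: t, best =>
    let k := takeRun x t + 1
    goB ((x :: t).drop k) (if (k : Int) > best then (k : Int) else best)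
  termination_by l _ => l.length
  decreasing_by simp

lemma jEnd_eq (l : List String) (x : String) (j : Nat) :
    jEnd l x j = j + takeRun x (l.drop j) := by
  unfold jEnd
  split_ifs with h
  · obtain ⟨hj, hx⟩ := h
    rw [jEnd_eq l x (j + 1)]
    have hdrop : l.drop j = l[j] :: l.drop (j + 1) := (List.getElem_cons_drop hj).symm
    have hget : l.getD j "" = l[j] := List.getD_eq_getElem l "" hj
    rw [hdrop, takeRun]
    rw [hget] at hx
    simp [hx]
    omega
  · rcases Nat.lt_or_ge j l.length with hj | hj
    · have hdrop : l.drop j = l[j] :: l.drop (j + 1) := (List.getElem_cons_drop hj).symm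
      have hget : l.getD j "" = l[j] := List.getD_eq_getElem l "" hj
      have hx : (l[j] == x) = false := by
        rw [← hget]
        rcases Bool.eq_false_or_eq_true (l.getD j "" == x) with h' | h'
        · exact absurd ⟨hj, h'⟩ h
        · exact h'
      rw [hdrop, takeRun, hx]
      simp
    · rw [List.drop_eq_nil_of_le hj, takeRun]
      omega
  termination_by l.length - j
  decreasing_by omega

lemma goB2_eq_aux (l : List String) : ∀ (n i : Nat) (best : Int), l.length - i ≤ n →
    goB2 l best i = goB (l.drop i) best := by
  intro n
  induction n with
  | zero =>
    intro i best hfuel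
    have hi : l.length ≤ i := by omega
    rw [goB2, if_neg (by omega), List.drop_eq_nil_of_le hi, goB]
  | succ n ih =>
    intro i best hfuel
    rcases Nat.lt_or_ge i l.length with hi | hi
    case inr => rw [goB2, if_neg (by omega), List.drop_eq_nil_of_le hi, goB]
    have hdrop : l.drop i = l[i] :: l.drop (i + 1) := (List.getElem_cons_drop hi).symm
    have hget : l.getD i "" = l[i] := List.getD_eq_getElem l "" hi
    have hj : jEnd l (l.getD i "") (i + 1) = i + 1 + takeRun (l[i]) (l.drop (i + 1)) := by
      rw [jEnd_eq, hget]
    rw [goB2]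
    simp only [hi, if_true, hj]
    conv_rhs => rw [hdrop, goB]
    set T := takeRun (l[i]) (l.drop (i + 1)) with hT
    have hd2 : (l[i] :: l.drop (i + 1)).drop (T + 1) = l.drop (i + 1 + T) := by
      rw [List.drop_succ_cons, List.drop_drop]
    have hcast : ((i + 1 + T : Nat) : Int) - (i : Nat) = ((T + 1 : Nat) : Int) := by
      push_cast; ring
    rw [hcast, hd2]
    exact ih (i + 1 + T) _ (by omega)

lemma goB2_eq (l : List String) (i : Nat) (best : Int) :
    goB2 l best i = goB (l.drop i) best :=
  goB2_eq_aux l l.length i best (by omega)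

-- structural form of A's index loop: prev = list[i-1], rest = list[i:]
def loopA : String → List String → Int × Int → Int × Int
  | _, [], s => s
  | prev, y :: t, s =>
    if y == prev then loopA y t (s.1 + 1, max (s.1 + 1) s.2)
    else loopA y t (1, s.2)

lemma foldA (l : List String) (a : Nat) (h1 : 1 ≤ a) (s : Int × Int) :
    (PySem.List.pyRange (a : Int) (l.length : Int) 1).foldl
      (fun (s : Int × Int) (i : Int) =>
        if PySem.List.pyGetD l i "" == PySem.List.pyGetD l (i - 1) "" then
          (s.1 + 1, max (s.1 + 1) s.2)
        else
          (1, s.2)) s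
    = loopA (l.getD (a - 1) "") (l.drop a) s := by
  induction hfuel : l.length - a generalizing a s with
  | zero =>
    have hle : l.length ≤ a := by omega
    rw [PySem.List.pyRange_one_eq_nil (by exact_mod_cast hle)]
    simp [List.drop_eq_nil_of_le hle, loopA]
  | succ n ih =>
    have ha : a < l.length := by omega
    rw [PySem.List.pyRange_one_cons (by exact_mod_cast ha)]
    simp only [List.foldl_cons]
    have hi : ((a : Int) - 1) = ((a - 1 : Nat) : Int) := by omega
    rw [hi]
    rw [PySem.List.pyGetD_natCast, PySem.List.pyGetD_natCast]
    have hdrop : l.drop a = l[a] :: l.drop (a + 1) := (List.getElem_cons_drop ha).symm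
    rw [hdrop]
    have hget : l.getD a "" = l[a] := List.getD_eq_getElem l "" ha
    show _ = loopA (l.getD (a - 1) "") (l[a] :: l.drop (a + 1)) s
    unfold loopA
    rw [← hget]
    rw [show ((a : Int) + 1) = ((a + 1 : Nat) : Int) by push_cast; ring]
    split_ifs with h
    · rw [ih (a + 1) (by omega) _ (by omega)]
      simp
    · rw [ih (a + 1) (by omega) _ (by omega)]
      simp

lemma if_gt_eq_max (a b : Int) : (if a > b then a else b) = max b a := by
  split_ifs with h <;> omega

lemma L1 (t : List String) : ∀ (x : String) (cnt ans : Int), 1 ≤ cnt → cnt ≤ ans →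
    (loopA x t (cnt, ans)).2
      = goB (t.drop (takeRun x t)) (max ans (cnt + takeRun x t)) := by
  induction t with
  | nil =>
    intro x cnt ans h1 h2
    simp only [loopA, takeRun, List.drop_nil, Nat.cast_zero, add_zero]
    rw [goB]
    omega
  | cons y t' ih =>
    intro x cnt ans h1 h2
    by_cases hxy : y = x
    · subst hxy
      simp only [loopA, BEq.rfl, if_true, takeRun]
      rw [ih y (cnt + 1) (max (cnt + 1) ans) (by omega) (le_max_left _ _)]
      have h3 : (0 : Int) ≤ takeRun y t' := Int.natCast_nonneg _
      have : max (max (cnt + 1) ans) (cnt + 1 + (takeRun y t' : Int))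
          = max ans (cnt + ((takeRun y t' : Nat) + 1 : Nat)) := by push_cast; omega
      rw [this]
      simp
    · have hbeq : (y == x) = false := by simp [hxy]
      simp only [loopA, takeRun, hbeq, Bool.false_eq_true, if_false, Nat.cast_zero]
      rw [ih y 1 ans (by omega) (by omega)]
      show _ = goB (y :: t') (max ans (cnt + (0 : Nat)))
      have : max ans (cnt + ((0 : Nat) : Int)) = ans := by push_cast; omega
      rw [this]
      conv_rhs => rw [goB]
      rw [if_gt_eq_max]
      have : max ans ((takeRun y t' + 1 : Nat) : Int) = max ans (1 + (takeRun y t' : Int)) := by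
        push_cast; omega
      simp only [List.drop_succ_cons]
      rw [this]

-- ===== VERDICT (by name: the statement is the Claim_ definition above) =====
theorem count_spec : Claim_equal_count := by
  intro list _
  unfold Spec_count count count_alt
  rw [goB2_eq, List.drop_zero]
  cases list with
  | nil =>
    rw [goB]
    simp [PySem.List.pyRange]
  | cons x t =>
    have h := foldA (x :: t) 1 (le_refl 1) (1, 1)
    simp only [PySem.List.len_eq] at *
    rw [show ((1 : Nat) : Int) = (1 : Int) by norm_num] at h
    simp only [show (1 - 1 : Nat) = 0 from rfl, List.getD_cons_zero, List.drop_succ_cons,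
      List.drop_zero] at h
    rw [h]
    rw [L1 t x 1 1 (le_refl 1) (le_refl 1)]
    show _ = goB (x :: t) 1
    conv_rhs => rw [goB]
    rw [if_gt_eq_max]
    have : max (1 : Int) ((takeRun x t + 1 : Nat) : Int) = max 1 (1 + (takeRun x t : Int)) := by
      push_cast; omega
    simp only [List.drop_succ_cons]
    rw [this]
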